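-- pv_equiv track=rewrite | github.com/Yasir323/ExpenseTrackerApp | app/simplify_expenses.py | get_borrowers_and_lenders
-- ===== SOURCE A (Python) =====
-- import collections
--
-- def get_borrowers_and_lenders(expense: list):
--     borrowers = collections.defaultdict(int)
--     lenders = collections.defaultdict(int)
--     for borrower, lender, amount in expense:
--         if borrower in lenders:
--             lenders[borrower] -= amount
--         else:
--             borrowers[borrower] += amount
--         if lender in borrowers:
--             borrowers[lender] -= amount
--         else:
--             lenders[lender] += amount
--     return borrowers, lenders
-- ===== SOURCE B (Python) =====
-- import collections
--
-- def get_borrowers_and_lenders(expense: list):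
--     # One pass: per-person signed net (borrowed - lent) and first-seen role.
--     net = {}
--     first_role = {}  # person -> True if first seen in the borrower column
--     for borrower, lender, amount in expense:
--         if borrower not in first_role:
--             first_role[borrower] = True
--         net[borrower] = net.get(borrower, 0) + amount
--         if lender not in first_role:
--             first_role[lender] = False
--         net[lender] = net.get(lender, 0) - amount
--     borrowers = collections.defaultdict(int)
--     lenders = collections.defaultdict(int)
--     for person, is_borrower in first_role.items():
--         if is_borrower:
--             borrowers[person] = net[person]
--         else:
--             lenders[person] = -net[person]
--     return borrowers, lenders
-- ===== Notes on version B (the rewrite author's own statement) =====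
-- stated objective: alternative
-- what changed: B replaces A's per-event conditional routing between two mutually-updated dicts by one pass computing each person's signed net balance plus first-seen role, then a second pass placing each person once into the proper dict with the net (or negated net) value.
import Mathlib
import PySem

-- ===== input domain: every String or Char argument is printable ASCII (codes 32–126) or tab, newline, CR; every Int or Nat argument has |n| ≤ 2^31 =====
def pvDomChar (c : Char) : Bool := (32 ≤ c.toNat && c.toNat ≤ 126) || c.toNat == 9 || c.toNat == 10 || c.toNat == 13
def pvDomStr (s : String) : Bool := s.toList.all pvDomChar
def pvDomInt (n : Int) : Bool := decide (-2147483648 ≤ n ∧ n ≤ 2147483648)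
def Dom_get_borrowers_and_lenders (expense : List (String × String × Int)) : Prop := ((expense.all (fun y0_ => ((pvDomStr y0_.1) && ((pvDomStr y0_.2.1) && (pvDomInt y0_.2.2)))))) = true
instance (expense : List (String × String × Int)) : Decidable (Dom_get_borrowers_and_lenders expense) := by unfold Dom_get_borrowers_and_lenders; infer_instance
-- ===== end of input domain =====

-- B aggregates via a per-person signed net balance and first-seen role instead of A's
-- per-event conditional routing between two mutually-updated dicts (objective: alternative decomposition).

-- ===== PORT A =====
-- loop body of A's for-loop; defaultdict accesses d[k] op= amount are Dict.modify k 0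
def pvStepA (s : PySem.Dict String Int × PySem.Dict String Int) (t : String × String × Int) :
    PySem.Dict String Int × PySem.Dict String Int :=
  let borrowers := s.1
  let lenders := s.2
  let bl :=
    if lenders.contains t.1 then (borrowers, lenders.modify t.1 0 (fun v => v - t.2.2))
    else (borrowers.modify t.1 0 (fun v => v + t.2.2), lenders)
  if bl.1.contains t.2.1 then (bl.1.modify t.2.1 0 (fun v => v - t.2.2), bl.2)
  else (bl.1, bl.2.modify t.2.1 0 (fun v => v + t.2.2))

def get_borrowers_and_lenders (expense : List (String × String × Int)) :
    (List (String × Int)) × (List (String × Int)) :=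
  let s := expense.foldl pvStepA (PySem.Dict.empty, PySem.Dict.empty)
  (s.1.items, s.2.items)

-- ===== PORT B =====
-- first pass of Source B: net[p] (borrowed - lent) and first_role[p] (true = first seen as borrower)
def pvStepNet (s : PySem.Dict String Int × PySem.Dict String Bool) (t : String × String × Int) :
    PySem.Dict String Int × PySem.Dict String Bool :=
  let net := s.1
  let fr := s.2
  let fr := if fr.contains t.1 then fr else fr.insert t.1 true
  let net := net.insert t.1 (net.getD t.1 0 + t.2.2)
  let fr := if fr.contains t.2.1 then fr else fr.insert t.2.1 false
  let net := net.insert t.2.1 (net.getD t.2.1 0 - t.2.2)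
  (net, fr)

-- second pass of Source B: place each person (first-seen order) into the proper output dict
def pvPlace (net : PySem.Dict String Int) (s : PySem.Dict String Int × PySem.Dict String Int)
    (p : String × Bool) : PySem.Dict String Int × PySem.Dict String Int :=
  if p.2 then (s.1.insert p.1 (net.getD p.1 0), s.2)
  else (s.1, s.2.insert p.1 (-(net.getD p.1 0)))

def get_borrowers_and_lenders_alt (expense : List (String × String × Int)) :
    (List (String × Int)) × (List (String × Int)) :=
  let s := expense.foldl pvStepNet (PySem.Dict.empty, PySem.Dict.empty)
  let out := s.2.items.foldl (pvPlace s.1) (PySem.Dict.empty, PySem.Dict.empty)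
  (out.1.items, out.2.items)

-- ===== PRECONDITION & SPEC =====
def Spec_get_borrowers_and_lenders (expense : List (String × String × Int)) (out : (List (String × Int)) × (List (String × Int))) : Prop := out = get_borrowers_and_lenders_alt expense
instance (expense : List (String × String × Int)) (out : (List (String × Int)) × (List (String × Int))) : Decidable (Spec_get_borrowers_and_lenders expense out) := by unfold Spec_get_borrowers_and_lenders; infer_instance

-- ===== CLAIM (what is proved, stated in full; the proofs are below) =====
def Claim_equal_get_borrowers_and_lenders : Prop := ∀ (expense : List (String × String × Int)), Dom_get_borrowers_and_lenders expense → Spec_get_borrowers_and_lenders expense (get_borrowers_and_lenders expense)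

-- ===== LEMMAS AND PROOFS =====

-- invariant tying A's (borrowers, lenders) state to B's (net, first_role) state
def pvInv (B L net : PySem.Dict String Int) (fr : PySem.Dict String Bool) : Prop :=
  fr.keys.Nodup ∧
  (∀ k, fr.contains k = false → net.getD k 0 = 0) ∧
  B.items = (fr.items.filter (fun p => p.2)).map (fun p => (p.1, net.getD p.1 0)) ∧
  L.items = (fr.items.filter (fun p => !p.2)).map (fun p => (p.1, -net.getD p.1 0))

-- a dict whose items are a filtered-and-mapped view of fr.items: membership, nodup, lookup
theorem pvContains_aux (fr : PySem.Dict String Bool) (hnd : fr.keys.Nodup)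
    (d : PySem.Dict String Int) (q : Bool → Bool) (g : String → Int)
    (hd : d.items = (fr.items.filter (fun p => q p.2)).map (fun p => (p.1, g p.1))) (x : String) :
    d.contains x = true ↔ ∃ v, fr.get? x = some v ∧ q v = true := by
  rw [PySem.Dict.contains_eq_decide_mem_keys, decide_eq_true_iff]
  simp only [PySem.Dict.keys, hd, List.map_map, List.mem_map, Function.comp, List.mem_filter]
  constructor
  · rintro ⟨p, ⟨hpm, hpq⟩, hpx⟩
    exact ⟨p.2, by rw [← hpx]; exact PySem.Dict.get?_of_mem_items fr (by simpa using hpm) hnd, hpq⟩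
  · rintro ⟨v, hv, hq⟩
    exact ⟨(x, v), ⟨PySem.Dict.mem_items_of_get?_eq_some fr hv, hq⟩, rfl⟩

theorem pvNodup_aux (fr : PySem.Dict String Bool) (hnd : fr.keys.Nodup)
    (d : PySem.Dict String Int) (q : Bool → Bool) (g : String → Int)
    (hd : d.items = (fr.items.filter (fun p => q p.2)).map (fun p => (p.1, g p.1))) :
    d.keys.Nodup := by
  have hsub : (d.items.map Prod.fst).Sublist (fr.items.map Prod.fst) := by
    rw [hd, List.map_map]
    have : ((fr.items.filter (fun p => q p.2)).map
        (Prod.fst ∘ fun p => (p.1, g p.1))) = (fr.items.filter (fun p => q p.2)).map Prod.fst := by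
      simp [Function.comp]
    rw [this]
    exact List.Sublist.map _ List.filter_sublist
  exact hnd.sublist hsub

theorem pvGetD_aux (fr : PySem.Dict String Bool) (hnd : fr.keys.Nodup)
    (d : PySem.Dict String Int) (q : Bool → Bool) (g : String → Int)
    (hd : d.items = (fr.items.filter (fun p => q p.2)).map (fun p => (p.1, g p.1)))
    (x : String) (v : Bool) (hv : fr.get? x = some v) (hq : q v = true) :
    d.getD x 0 = g x := by
  have hm : (x, g x) ∈ d.items := by
    rw [hd]
    exact List.mem_map.mpr ⟨(x, v), List.mem_filter.mpr ⟨PySem.Dict.mem_items_of_get?_eq_some fr hv, hq⟩, rfl⟩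
  exact PySem.Dict.getD_of_mem_items d hm (pvNodup_aux fr hnd d q g hd) 0

-- one half of A's loop body vs one half of B's first pass: person x seen in the borrower
-- column with sign s = +amount (sgn = true) or the lender column with s = -amount (sgn = false)
theorem pvInv_half (B L net : PySem.Dict String Int) (fr : PySem.Dict String Bool)
    (x : String) (s : Int) (h : pvInv B L net fr) :
    pvInv (if L.contains x then B else B.modify x 0 (fun v => v + s))
          (if L.contains x then L.modify x 0 (fun v => v - s) else L)
          (net.insert x (net.getD x 0 + s))
          (if fr.contains x then fr else fr.insert x true) := by
  obtain ⟨hnd, hz, hB, hL⟩ := h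
  have hBc := pvContains_aux fr hnd B (fun v => v) (fun k => net.getD k 0) hB
  have hLc := pvContains_aux fr hnd L (fun v => !v) (fun k => -net.getD k 0) hL
  rcases hfb : fr.get? x with _ | v
  · -- x fresh: goes to borrowers with value 0 + s; fr gains (x, true)
    have hfc : fr.contains x = false := by
      rw [PySem.Dict.contains_eq_isSome_get?, hfb]; rfl
    have hxk : x ∉ fr.keys := by
      intro hm
      exact absurd ((PySem.Dict.contains_iff_mem_keys fr x).mpr hm) (by simp [hfc])
    have hLb : L.contains x = false := by
      rcases hLcb : L.contains x
      · rfl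
      · obtain ⟨v, hv, _⟩ := (hLc x).mp hLcb; rw [hfb] at hv; exact absurd hv (by simp)
    have hBb : B.contains x = false := by
      rcases hBcb : B.contains x
      · rfl
      · obtain ⟨v, hv, _⟩ := (hBc x).mp hBcb; rw [hfb] at hv; exact absurd hv (by simp)
    have hBg0 : B.getD x 0 = 0 := PySem.Dict.getD_of_not_contains B 0 hBb
    have hmod : B.modify x 0 (fun v => v + s) = B.insert x (B.getD x 0 + s) := rfl
    have hfresh : ∀ p ∈ fr.items, p.1 ≠ x := by
      intro p hp hpx
      exact hxk (hpx ▸ PySem.Dict.mem_keys_of_mem_items fr hp)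
    refine ⟨?_, ?_, ?_, ?_⟩ <;> simp only [hLb, hfc, Bool.false_eq_true, if_false]
    · rw [PySem.Dict.keys_insert_of_not_contains fr _ hfc]
      simp only [List.nodup_append, List.nodup_cons]
      exact ⟨hnd, by simp, by intro a ha b hb hab; rw [List.mem_singleton] at hb; exact hxk ((hab.trans hb) ▸ ha)⟩
    · intro k hk
      rw [PySem.Dict.contains_insert fr x k true] at hk
      have hkx : (k == x) = false := by
        rcases hkx' : k == x
        · rfl
        · rw [hkx'] at hk; simp at hk
      have hkc : fr.contains k = false := by
        rw [hkx] at hk; simpa using hk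
      rw [PySem.Dict.getD_insert_of_ne net _ _ (by simpa using hkx)]
      exact hz k hkc
    · rw [hmod, hBg0, PySem.Dict.items_insert_of_not_contains B _ hBb,
        PySem.Dict.items_insert_of_not_contains fr _ hfc]
      rw [List.filter_append, List.map_append, hB]
      congr 1
      · exact List.map_congr_left (fun p hp => by
          rw [PySem.Dict.getD_insert_of_ne net _ _ (hfresh p (List.mem_filter.mp hp).1)])
      · simp [PySem.Dict.getD_insert_self, hz x hfc]
    · rw [PySem.Dict.items_insert_of_not_contains fr _ hfc]
      rw [List.filter_append, List.map_append, hL]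
      have : List.filter (fun p => !p.2) [((x : String), true)] = [] := by simp
      rw [this, List.map_nil, List.append_nil]
      exact List.map_congr_left (fun p hp => by
        rw [PySem.Dict.getD_insert_of_ne net _ _ (hfresh p (List.mem_filter.mp hp).1)])
  · rcases v
    · -- fr.get? x = some false: x lives in lenders; lenders[x] -= -s i.e. -= (−s)… here: L.modify (· - s)
      have hfc : fr.contains x = true := by
        rw [PySem.Dict.contains_eq_isSome_get?, hfb]; rfl
      have hLb : L.contains x = true := (hLc x).mpr ⟨false, hfb, rfl⟩
      have hLg : L.getD x 0 = -net.getD x 0 :=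
        pvGetD_aux fr hnd L (fun v => !v) (fun k => -net.getD k 0) hL x false hfb rfl
      have hmod : L.modify x 0 (fun v => v - s) = L.insert x (L.getD x 0 - s) := rfl
      refine ⟨?_, ?_, ?_, ?_⟩ <;> simp only [hLb, hfc, if_true]
      · exact hnd
      · intro k hk
        have hkx : k ≠ x := by
          intro he; rw [he, hfc] at hk; exact absurd hk (by simp)
        rw [PySem.Dict.getD_insert_of_ne net _ _ hkx]
        exact hz k hk
      · rw [hB]
        refine List.map_congr_left (fun p hp => ?_)
        obtain ⟨hpm, hpq⟩ := List.mem_filter.mp hp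
        have hpx : p.1 ≠ x := by
          intro he
          have := PySem.Dict.get?_of_mem_items fr (k := p.1) (v := p.2) (by simpa using hpm) hnd
          rw [he, hfb] at this
          simp only [Option.some.injEq] at this
          rw [← this] at hpq; simp at hpq
        rw [PySem.Dict.getD_insert_of_ne net _ _ hpx]
      · rw [hmod, hLg]
        rw [PySem.Dict.items_insert_of_contains L _ hLb, hL, List.map_map]
        refine List.map_congr_left (fun p hp => ?_)
        by_cases hpx : p.1 = x
        · simp only [Function.comp, hpx, BEq.rfl, if_true, PySem.Dict.getD_insert_self]
          ring_nf
        · have hbe : (p.1 == x) = false := by simpa using hpx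
          simp only [Function.comp, hbe, Bool.false_eq_true, if_false,
            PySem.Dict.getD_insert_of_ne net _ _ hpx]
    · -- fr.get? x = some true: x lives in borrowers; borrowers[x] += s
      have hfc : fr.contains x = true := by
        rw [PySem.Dict.contains_eq_isSome_get?, hfb]; rfl
      have hLb : L.contains x = false := by
        rcases hLcb : L.contains x
        · rfl
        · obtain ⟨v, hv, hq⟩ := (hLc x).mp hLcb; rw [hfb] at hv
          simp only [Option.some.injEq] at hv; rw [← hv] at hq; simp at hq
      have hBb : B.contains x = true := (hBc x).mpr ⟨true, hfb, rfl⟩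
      have hBg : B.getD x 0 = net.getD x 0 :=
        pvGetD_aux fr hnd B (fun v => v) (fun k => net.getD k 0) hB x true hfb rfl
      have hmod : B.modify x 0 (fun v => v + s) = B.insert x (B.getD x 0 + s) := rfl
      refine ⟨?_, ?_, ?_, ?_⟩ <;> simp only [hLb, hfc, Bool.false_eq_true, if_false, if_true]
      · exact hnd
      · intro k hk
        have hkx : k ≠ x := by
          intro he; rw [he, hfc] at hk; exact absurd hk (by simp)
        rw [PySem.Dict.getD_insert_of_ne net _ _ hkx]
        exact hz k hk
      · rw [hmod, hBg]
        rw [PySem.Dict.items_insert_of_contains B _ hBb, hB, List.map_map]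
        refine List.map_congr_left (fun p hp => ?_)
        by_cases hpx : p.1 = x
        · simp only [Function.comp, hpx, BEq.rfl, if_true, PySem.Dict.getD_insert_self]
        · have hbe : (p.1 == x) = false := by simpa using hpx
          simp only [Function.comp, hbe, Bool.false_eq_true, if_false,
            PySem.Dict.getD_insert_of_ne net _ _ hpx]
      · rw [hL]
        refine List.map_congr_left (fun p hp => ?_)
        obtain ⟨hpm, hpq⟩ := List.mem_filter.mp hp
        have hpx : p.1 ≠ x := by
          intro he
          have := PySem.Dict.get?_of_mem_items fr (k := p.1) (v := p.2) (by simpa using hpm) hnd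
          rw [he, hfb] at this
          simp only [Option.some.injEq] at this
          rw [← this] at hpq; simp at hpq
        rw [PySem.Dict.getD_insert_of_ne net _ _ hpx]

-- mirror half: person x seen in the lender column (first-seen role false, net -= s)
theorem pvInv_half_l (B L net : PySem.Dict String Int) (fr : PySem.Dict String Bool)
    (x : String) (s : Int) (h : pvInv B L net fr) :
    pvInv (if B.contains x then B.modify x 0 (fun v => v - s) else B)
          (if B.contains x then L else L.modify x 0 (fun v => v + s))
          (net.insert x (net.getD x 0 - s))
          (if fr.contains x then fr else fr.insert x false) := by
  obtain ⟨hnd, hz, hB, hL⟩ := h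
  have hBc := pvContains_aux fr hnd B (fun v => v) (fun k => net.getD k 0) hB
  have hLc := pvContains_aux fr hnd L (fun v => !v) (fun k => -net.getD k 0) hL
  rcases hfb : fr.get? x with _ | v
  · -- x fresh: goes to lenders with value -(0 - s) = 0 + s; fr gains (x, false)
    have hfc : fr.contains x = false := by
      rw [PySem.Dict.contains_eq_isSome_get?, hfb]; rfl
    have hxk : x ∉ fr.keys := by
      intro hm
      exact absurd ((PySem.Dict.contains_iff_mem_keys fr x).mpr hm) (by simp [hfc])
    have hLb : L.contains x = false := by
      rcases hLcb : L.contains x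
      · rfl
      · obtain ⟨v, hv, _⟩ := (hLc x).mp hLcb; rw [hfb] at hv; exact absurd hv (by simp)
    have hBb : B.contains x = false := by
      rcases hBcb : B.contains x
      · rfl
      · obtain ⟨v, hv, _⟩ := (hBc x).mp hBcb; rw [hfb] at hv; exact absurd hv (by simp)
    have hLg0 : L.getD x 0 = 0 := PySem.Dict.getD_of_not_contains L 0 hLb
    have hmod : L.modify x 0 (fun v => v + s) = L.insert x (L.getD x 0 + s) := rfl
    have hfresh : ∀ p ∈ fr.items, p.1 ≠ x := by
      intro p hp hpx
      exact hxk (hpx ▸ PySem.Dict.mem_keys_of_mem_items fr hp)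
    refine ⟨?_, ?_, ?_, ?_⟩ <;> simp only [hBb, hfc, Bool.false_eq_true, if_false]
    · rw [PySem.Dict.keys_insert_of_not_contains fr _ hfc]
      simp only [List.nodup_append, List.nodup_cons]
      exact ⟨hnd, by simp, by intro a ha b hb hab; rw [List.mem_singleton] at hb; exact hxk ((hab.trans hb) ▸ ha)⟩
    · intro k hk
      rw [PySem.Dict.contains_insert fr x k false] at hk
      have hkx : (k == x) = false := by
        rcases hkx' : k == x
        · rfl
        · rw [hkx'] at hk; simp at hk
      have hkc : fr.contains k = false := by
        rw [hkx] at hk; simpa using hk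
      rw [PySem.Dict.getD_insert_of_ne net _ _ (by simpa using hkx)]
      exact hz k hkc
    · rw [PySem.Dict.items_insert_of_not_contains fr _ hfc]
      rw [List.filter_append, List.map_append, hB]
      have : List.filter (fun p => p.2) [((x : String), false)] = [] := by simp
      rw [this, List.map_nil, List.append_nil]
      exact List.map_congr_left (fun p hp => by
        rw [PySem.Dict.getD_insert_of_ne net _ _ (hfresh p (List.mem_filter.mp hp).1)])
    · rw [hmod, hLg0, PySem.Dict.items_insert_of_not_contains L _ hLb,
        PySem.Dict.items_insert_of_not_contains fr _ hfc]
      rw [List.filter_append, List.map_append, hL]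
      congr 1
      · exact List.map_congr_left (fun p hp => by
          rw [PySem.Dict.getD_insert_of_ne net _ _ (hfresh p (List.mem_filter.mp hp).1)])
      · simp [PySem.Dict.getD_insert_self, hz x hfc]
  · rcases v
    · -- fr.get? x = some false: x lives in lenders; lenders[x] += s
      have hfc : fr.contains x = true := by
        rw [PySem.Dict.contains_eq_isSome_get?, hfb]; rfl
      have hBb : B.contains x = false := by
        rcases hBcb : B.contains x
        · rfl
        · obtain ⟨v, hv, hq⟩ := (hBc x).mp hBcb; rw [hfb] at hv
          simp only [Option.some.injEq] at hv; rw [← hv] at hq; simp at hq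
      have hLb : L.contains x = true := (hLc x).mpr ⟨false, hfb, rfl⟩
      have hLg : L.getD x 0 = -net.getD x 0 :=
        pvGetD_aux fr hnd L (fun v => !v) (fun k => -net.getD k 0) hL x false hfb rfl
      have hmod : L.modify x 0 (fun v => v + s) = L.insert x (L.getD x 0 + s) := rfl
      refine ⟨?_, ?_, ?_, ?_⟩ <;> simp only [hBb, hfc, Bool.false_eq_true, if_false, if_true]
      · exact hnd
      · intro k hk
        have hkx : k ≠ x := by
          intro he; rw [he, hfc] at hk; exact absurd hk (by simp)
        rw [PySem.Dict.getD_insert_of_ne net _ _ hkx]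
        exact hz k hk
      · rw [hB]
        refine List.map_congr_left (fun p hp => ?_)
        obtain ⟨hpm, hpq⟩ := List.mem_filter.mp hp
        have hpx : p.1 ≠ x := by
          intro he
          have := PySem.Dict.get?_of_mem_items fr (k := p.1) (v := p.2) (by simpa using hpm) hnd
          rw [he, hfb] at this
          simp only [Option.some.injEq] at this
          rw [← this] at hpq; simp at hpq
        rw [PySem.Dict.getD_insert_of_ne net _ _ hpx]
      · rw [hmod, hLg]
        rw [PySem.Dict.items_insert_of_contains L _ hLb, hL, List.map_map]
        refine List.map_congr_left (fun p hp => ?_)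
        by_cases hpx : p.1 = x
        · simp only [Function.comp, hpx, BEq.rfl, if_true, PySem.Dict.getD_insert_self]
          ring_nf
        · have hbe : (p.1 == x) = false := by simpa using hpx
          simp only [Function.comp, hbe, Bool.false_eq_true, if_false,
            PySem.Dict.getD_insert_of_ne net _ _ hpx]
    · -- fr.get? x = some true: x lives in borrowers; borrowers[x] -= s
      have hfc : fr.contains x = true := by
        rw [PySem.Dict.contains_eq_isSome_get?, hfb]; rfl
      have hBb : B.contains x = true := (hBc x).mpr ⟨true, hfb, rfl⟩
      have hBg : B.getD x 0 = net.getD x 0 :=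
        pvGetD_aux fr hnd B (fun v => v) (fun k => net.getD k 0) hB x true hfb rfl
      have hmod : B.modify x 0 (fun v => v - s) = B.insert x (B.getD x 0 - s) := rfl
      refine ⟨?_, ?_, ?_, ?_⟩ <;> simp only [hBb, hfc, if_true]
      · exact hnd
      · intro k hk
        have hkx : k ≠ x := by
          intro he; rw [he, hfc] at hk; exact absurd hk (by simp)
        rw [PySem.Dict.getD_insert_of_ne net _ _ hkx]
        exact hz k hk
      · rw [hmod, hBg]
        rw [PySem.Dict.items_insert_of_contains B _ hBb, hB, List.map_map]
        refine List.map_congr_left (fun p hp => ?_)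
        by_cases hpx : p.1 = x
        · simp only [Function.comp, hpx, BEq.rfl, if_true, PySem.Dict.getD_insert_self]
        · have hbe : (p.1 == x) = false := by simpa using hpx
          simp only [Function.comp, hbe, Bool.false_eq_true, if_false,
            PySem.Dict.getD_insert_of_ne net _ _ hpx]
      · rw [hL]
        refine List.map_congr_left (fun p hp => ?_)
        obtain ⟨hpm, hpq⟩ := List.mem_filter.mp hp
        have hpx : p.1 ≠ x := by
          intro he
          have := PySem.Dict.get?_of_mem_items fr (k := p.1) (v := p.2) (by simpa using hpm) hnd
          rw [he, hfb] at this
          simp only [Option.some.injEq] at this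
          rw [← this] at hpq; simp at hpq
        rw [PySem.Dict.getD_insert_of_ne net _ _ hpx]

theorem pvInv_step (B L net : PySem.Dict String Int) (fr : PySem.Dict String Bool)
    (t : String × String × Int) (h : pvInv B L net fr) :
    pvInv (pvStepA (B, L) t).1 (pvStepA (B, L) t).2 (pvStepNet (net, fr) t).1 (pvStepNet (net, fr) t).2 := by
  obtain ⟨b, l, a⟩ := t
  have h1 := pvInv_half B L net fr b a h
  by_cases hc : L.contains b = true
  · simp only [hc, if_true] at h1
    have h2 := pvInv_half_l B (L.modify b 0 (fun v => v - a))
      (net.insert b (net.getD b 0 + a)) (if fr.contains b then fr else fr.insert b true) l a h1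
    by_cases hc2 : B.contains l = true
    · simp only [hc2, if_true] at h2
      simpa [pvStepA, pvStepNet, hc, hc2] using h2
    · simp only [hc2] at h2
      simpa [pvStepA, pvStepNet, hc, hc2] using h2
  · simp only [hc] at h1
    have h2 := pvInv_half_l (B.modify b 0 (fun v => v + a)) L
      (net.insert b (net.getD b 0 + a)) (if fr.contains b then fr else fr.insert b true) l a h1
    by_cases hc2 : (B.modify b 0 (fun v => v + a)).contains l = true
    · simp only [hc2, if_true] at h2
      simpa [pvStepA, pvStepNet, hc, hc2] using h2
    · simp only [hc2] at h2
      simpa [pvStepA, pvStepNet, hc, hc2] using h2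

theorem pvInv_fold (e : List (String × String × Int)) :
    ∀ (B L net : PySem.Dict String Int) (fr : PySem.Dict String Bool), pvInv B L net fr →
    pvInv (e.foldl pvStepA (B, L)).1 (e.foldl pvStepA (B, L)).2
          (e.foldl pvStepNet (net, fr)).1 (e.foldl pvStepNet (net, fr)).2 := by
  induction e with
  | nil => intro B L net fr h; exact h
  | cons t e ih =>
    intro B L net fr h
    have h' := pvInv_step B L net fr t h
    simpa using ih (pvStepA (B, L) t).1 (pvStepA (B, L) t).2
      (pvStepNet (net, fr) t).1 (pvStepNet (net, fr) t).2 h'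

theorem pvPlace_fold (net : PySem.Dict String Int) (l : List (String × Bool)) :
    ∀ (bs ls : PySem.Dict String Int),
    (l.map Prod.fst).Nodup →
    (∀ p ∈ l, bs.contains p.1 = false) → (∀ p ∈ l, ls.contains p.1 = false) →
    (l.foldl (pvPlace net) (bs, ls)).1.items
        = bs.items ++ (l.filter (fun p => p.2)).map (fun p => (p.1, net.getD p.1 0)) ∧
    (l.foldl (pvPlace net) (bs, ls)).2.items
        = ls.items ++ (l.filter (fun p => !p.2)).map (fun p => (p.1, -net.getD p.1 0)) := by
  induction l with
  | nil => intro bs ls _ _ _; simp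
  | cons p l ih =>
    intro bs ls hnd hbs hls
    have hnd1 : p.1 ∉ l.map Prod.fst := (List.nodup_cons.mp (by simpa using hnd)).1
    have hnd2 : (l.map Prod.fst).Nodup := (List.nodup_cons.mp (by simpa using hnd)).2
    have hne : ∀ q ∈ l, (q.1 == p.1) = false := by
      intro q hq
      have : q.1 ≠ p.1 := fun he => hnd1 (he ▸ List.mem_map_of_mem hq)
      simpa using this
    rcases hp2 : p.2
    · -- goes to lenders
      have hstep : (p :: l).foldl (pvPlace net) (bs, ls)
          = l.foldl (pvPlace net) (bs, ls.insert p.1 (-net.getD p.1 0)) := by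
        simp [pvPlace, hp2]
      have hfree : ls.contains p.1 = false := hls p (List.mem_cons_self)
      have hih := ih bs (ls.insert p.1 (-net.getD p.1 0)) hnd2
        (fun q hq => hbs q (List.mem_cons_of_mem p hq))
        (fun q hq => by
          rw [PySem.Dict.contains_insert ls p.1 q.1 _, hne q hq]
          simpa using hls q (List.mem_cons_of_mem p hq))
      rw [hstep]
      refine ⟨by simp [hih.1, hp2], ?_⟩
      rw [hih.2, PySem.Dict.items_insert_of_not_contains ls _ hfree]
      simp [hp2]
    · -- goes to borrowers
      have hstep : (p :: l).foldl (pvPlace net) (bs, ls)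
          = l.foldl (pvPlace net) (bs.insert p.1 (net.getD p.1 0), ls) := by
        simp [pvPlace, hp2]
      have hfree : bs.contains p.1 = false := hbs p (List.mem_cons_self)
      have hih := ih (bs.insert p.1 (net.getD p.1 0)) ls hnd2
        (fun q hq => by
          rw [PySem.Dict.contains_insert bs p.1 q.1 _, hne q hq]
          simpa using hbs q (List.mem_cons_of_mem p hq))
        (fun q hq => hls q (List.mem_cons_of_mem p hq))
      rw [hstep]
      refine ⟨?_, by simp [hih.2, hp2]⟩
      rw [hih.1, PySem.Dict.items_insert_of_not_contains bs _ hfree]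
      simp [hp2]

-- ===== VERDICT (by name: the statement is the Claim_ definition above) =====
theorem get_borrowers_and_lenders_spec : Claim_equal_get_borrowers_and_lenders := by
  intro expense _
  unfold Spec_get_borrowers_and_lenders get_borrowers_and_lenders get_borrowers_and_lenders_alt
  have hei : (PySem.Dict.empty : PySem.Dict String Int).items = [] := rfl
  have heb : (PySem.Dict.empty : PySem.Dict String Bool).items = [] := rfl
  have h0 : pvInv PySem.Dict.empty PySem.Dict.empty PySem.Dict.empty PySem.Dict.empty := by
    refine ⟨by simp [show (PySem.Dict.empty : PySem.Dict String Bool).keys = [] from rfl], fun k _ => rfl, by simp [hei, heb], by simp [hei, heb]⟩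
  have h := pvInv_fold expense PySem.Dict.empty PySem.Dict.empty PySem.Dict.empty PySem.Dict.empty h0
  obtain ⟨hnd, hz, hB, hL⟩ := h
  have hkeys : ((expense.foldl pvStepNet (PySem.Dict.empty, PySem.Dict.empty)).2.items.map Prod.fst).Nodup := hnd
  have hp := pvPlace_fold (expense.foldl pvStepNet (PySem.Dict.empty, PySem.Dict.empty)).1
      (expense.foldl pvStepNet (PySem.Dict.empty, PySem.Dict.empty)).2.items
      PySem.Dict.empty PySem.Dict.empty hkeys (fun p _ => by simp [pysem]) (fun p _ => by simp [pysem])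
  simp only [hp.1, hp.2, hB, hL, hei, List.nil_append]
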